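-- pv_equiv track=rewrite | github.com/Bushra-KB/cover-by-bushra-clean | app/main.py | _password_strength_errors
-- ===== SOURCE A (Python) =====
-- def _password_strength_errors(pw: str) -> list[str]:
--     errors = []
--     if len(pw) < 8:
--         errors.append("At least 8 characters")
--     if not any(c.islower() for c in pw):
--         errors.append("Include a lowercase letter")
--     if not any(c.isupper() for c in pw):
--         errors.append("Include an uppercase letter")
--     if not any(c.isdigit() for c in pw):
--         errors.append("Include a number")
--     if not any(c in "!@#$%^&*()_+-=[]{}|;:'\",.<>/?`~" for c in pw):
--         errors.append("Include a special character")
--     return errors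
-- ===== SOURCE B (Python) =====
-- def _password_strength_errors(pw: str) -> list[str]:
--     has_lower = has_upper = has_digit = has_special = False
--     for c in pw:
--         if c.islower():
--             has_lower = True
--         elif c.isupper():
--             has_upper = True
--         elif c.isdigit():
--             has_digit = True
--         elif c in "!@#$%^&*()_+-=[]{}|;:'\",.<>/?`~":
--             has_special = True
--     errors = []
--     if len(pw) < 8:
--         errors.append("At least 8 characters")
--     if not has_lower:
--         errors.append("Include a lowercase letter")
--     if not has_upper:
--         errors.append("Include an uppercase letter")
--     if not has_digit:
--         errors.append("Include a number")
--     if not has_special: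
--         errors.append("Include a special character")
--     return errors
-- ===== Notes on version B (the rewrite author's own statement) =====
-- stated objective: simpler
-- what changed: Replaced four independent any()-generator scans over the password with a single loop maintaining four boolean flags (the character classes are mutually exclusive, so an elif chain suffices), then assembling the error list from the flags.
import Mathlib
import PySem

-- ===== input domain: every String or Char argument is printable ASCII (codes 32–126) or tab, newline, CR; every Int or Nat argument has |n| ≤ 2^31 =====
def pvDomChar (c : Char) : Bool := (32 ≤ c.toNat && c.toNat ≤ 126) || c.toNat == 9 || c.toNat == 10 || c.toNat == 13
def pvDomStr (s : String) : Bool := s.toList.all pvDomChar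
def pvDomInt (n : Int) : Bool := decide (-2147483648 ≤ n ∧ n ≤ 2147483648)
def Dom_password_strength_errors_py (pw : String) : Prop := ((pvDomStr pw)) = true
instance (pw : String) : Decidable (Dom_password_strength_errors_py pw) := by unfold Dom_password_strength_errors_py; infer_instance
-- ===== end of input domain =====

-- B replaces A's four independent any()-scans by one pass keeping four boolean flags; objective: simpler.

-- ===== PORT A =====
-- the special-character string of A, as a list of chars
def pvSpecials : List Char := "!@#$%^&*()_+-=[]{}|;:'\",.<>/?`~".toList

def password_strength_errors_py (pw : String) : List String :=
  let errors : List String := []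
  let errors := if PySem.Str.len pw < 8 then errors ++ ["At least 8 characters"] else errors
  let errors := if !(pw.toList.any PySem.Chars.islower) then errors ++ ["Include a lowercase letter"] else errors
  let errors := if !(pw.toList.any PySem.Chars.isupper) then errors ++ ["Include an uppercase letter"] else errors
  let errors := if !(pw.toList.any PySem.Chars.isdigit) then errors ++ ["Include a number"] else errors
  let errors := if !(pw.toList.any (fun c => pvSpecials.contains c)) then errors ++ ["Include a special character"] else errors
  errors

-- ===== PORT B =====
-- single-pass flag update: the elif chain of Source B
def pvFlagStep (st : Bool × Bool × Bool × Bool) (c : Char) : Bool × Bool × Bool × Bool :=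
  let (hl, hu, hd, hs) := st
  if PySem.Chars.islower c then (true, hu, hd, hs)
  else if PySem.Chars.isupper c then (hl, true, hd, hs)
  else if PySem.Chars.isdigit c then (hl, hu, true, hs)
  else if pvSpecials.contains c then (hl, hu, hd, true)
  else st

def password_strength_errors_py_alt (pw : String) : List String :=
  let (hl, hu, hd, hs) := pw.toList.foldl pvFlagStep (false, false, false, false)
  let errors : List String := []
  let errors := if PySem.Str.len pw < 8 then errors ++ ["At least 8 characters"] else errors
  let errors := if !hl then errors ++ ["Include a lowercase letter"] else errors
  let errors := if !hu then errors ++ ["Include an uppercase letter"] else errors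
  let errors := if !hd then errors ++ ["Include a number"] else errors
  let errors := if !hs then errors ++ ["Include a special character"] else errors
  errors

-- ===== PRECONDITION & SPEC =====
def Spec_password_strength_errors_py (pw : String) (out : List String) : Prop := out = password_strength_errors_py_alt pw
instance (pw : String) (out : List String) : Decidable (Spec_password_strength_errors_py pw out) := by unfold Spec_password_strength_errors_py; infer_instance

-- ===== CLAIM (what is proved, stated in full; the proofs are below) =====
def Claim_equal_password_strength_errors_py : Prop := ∀ (pw : String), Dom_password_strength_errors_py pw → Spec_password_strength_errors_py pw (password_strength_errors_py pw)

-- ===== LEMMAS AND PROOFS =====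

-- each character belongs to at most one of the four classes (ASCII ranges / a punctuation list)
set_option maxRecDepth 4000 in
theorem pvSpecials_all_not_alnum : (pvSpecials.all (fun d => !(PySem.Chars.islower d) && !(PySem.Chars.isupper d) && !(PySem.Chars.isdigit d))) = true := by decide

theorem pvSpecials_not_alnum : ∀ d ∈ pvSpecials,
    PySem.Chars.islower d = false ∧ PySem.Chars.isupper d = false ∧ PySem.Chars.isdigit d = false := by
  intro d hd
  have h := List.all_eq_true.mp pvSpecials_all_not_alnum d hd
  simp at h
  exact ⟨h.1.1, h.1.2, h.2⟩

theorem pvLower_ranges (c : Char) (h : PySem.Chars.islower c = true) :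
    PySem.Chars.isupper c = false ∧ PySem.Chars.isdigit c = false ∧ c ∉ pvSpecials := by
  have hs : c ∉ pvSpecials := fun hm => absurd h (by simp [(pvSpecials_not_alnum c hm).1])
  simp only [PySem.Chars.islower, Bool.and_eq_true, decide_eq_true_eq] at h
  refine ⟨?_, ?_, hs⟩
  · simp only [PySem.Chars.isupper, Bool.and_eq_false_iff, decide_eq_false_iff_not]
    right; intro h2; exact absurd (le_trans h.1 h2) (by decide)
  · simp only [PySem.Chars.isdigit, Bool.and_eq_false_iff, decide_eq_false_iff_not]
    right; intro h2; exact absurd (le_trans h.1 h2) (by decide)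

theorem pvUpper_ranges (c : Char) (h : PySem.Chars.isupper c = true) :
    PySem.Chars.isdigit c = false ∧ c ∉ pvSpecials := by
  have hs : c ∉ pvSpecials := fun hm => absurd h (by simp [(pvSpecials_not_alnum c hm).2.1])
  simp only [PySem.Chars.isupper, Bool.and_eq_true, decide_eq_true_eq] at h
  refine ⟨?_, hs⟩
  simp only [PySem.Chars.isdigit, Bool.and_eq_false_iff, decide_eq_false_iff_not]
  right; intro h2; exact absurd (le_trans h.1 h2) (by decide)

theorem pvDigit_ranges (c : Char) (h : PySem.Chars.isdigit c = true) : c ∉ pvSpecials := by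
  intro hm
  simpa [h] using (pvSpecials_not_alnum c hm).2.2

-- the single fold computes exactly the four any-scans
theorem pvFold_eq (l : List Char) (a b d e : Bool) :
    l.foldl pvFlagStep (a, b, d, e) =
      (a || l.any PySem.Chars.islower, b || l.any PySem.Chars.isupper,
       d || l.any PySem.Chars.isdigit, e || l.any (fun c => pvSpecials.contains c)) := by
  induction l generalizing a b d e with
  | nil => simp
  | cons c l ih =>
    simp only [List.foldl_cons, List.any_cons]
    by_cases h1 : PySem.Chars.islower c = true
    · obtain ⟨hu, hd, hs⟩ := pvLower_ranges c h1
      simp [pvFlagStep, h1, hu, hd, hs, ih]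
    · by_cases h2 : PySem.Chars.isupper c = true
      · obtain ⟨hd, hs⟩ := pvUpper_ranges c h2
        simp [pvFlagStep, h1, h2, hd, hs, ih]
      · by_cases h3 : PySem.Chars.isdigit c = true
        · have hs := pvDigit_ranges c h3
          simp [pvFlagStep, h1, h2, h3, hs, ih]
        · by_cases h4 : c ∈ pvSpecials
          · simp [pvFlagStep, h1, h2, h3, h4, ih]
          · simp [pvFlagStep, h1, h2, h3, h4, ih]

-- ===== VERDICT (by name: the statement is the Claim_ definition above) =====
theorem password_strength_errors_py_spec : Claim_equal_password_strength_errors_py := by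
  intro pw _
  unfold Spec_password_strength_errors_py
  unfold password_strength_errors_py password_strength_errors_py_alt
  rw [pvFold_eq]
  simp
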